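-- pv_equiv track=rewrite | github.com/wbmoeller/zorkplayer | zp.py | parse_zork_output
-- ===== SOURCE A (Python) =====
-- def parse_zork_output(output):
--     """
--     Extracts the most recent response from Zork's output, handling multi-line responses,
--     blank lines, and cases where the game ends (e.g., player death, winning).
--     """
--     lines = output.splitlines()
--
--     # Find the index of the last ">" prompt
--     last_prompt_index = None
--     for i, line in enumerate(reversed(lines)):
--         if line.strip().startswith(">"):
--             last_prompt_index = len(lines) - 1 - i  # Convert to forward index
--             break
--
--     # If no prompt was found, return everything
--     if last_prompt_index is None:
--         return output  # Return everything for the initial prompt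
--
--     # Handle restart/quit prompt differently
--     if "RESTART" in lines[-1] or "QUIT" in lines[-1]:
--         start_index = last_prompt_index  # Return everything after the last prompt
--     else:
--         # Otherwise, extract the lines between the last two prompts (or since the last prompt)
--         second_to_last_prompt_index = None
--         for i in range(last_prompt_index - 1, -1, -1):
--             if lines[i].strip().startswith(">"):
--                 second_to_last_prompt_index = i
--                 break
--
--         start_index = second_to_last_prompt_index + 1 if second_to_last_prompt_index is not None else 0
--
--     return "\n".join(lines[start_index:]).strip()
-- ===== SOURCE B (Python) =====
-- def parse_zork_output(output):
--     """
--     Extracts the most recent response from Zork's output, handling multi-line responses,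
--     blank lines, and cases where the game ends (e.g., player death, winning).
--     """
--     lines = output.splitlines()
--     restart = bool(lines) and ("RESTART" in lines[-1] or "QUIT" in lines[-1])
--     stop_at = 1 if restart else 2
--     collected = []
--     seen = 0
--     for line in reversed(lines):
--         if line.strip().startswith(">"):
--             seen += 1
--             if seen == stop_at:
--                 if restart:
--                     collected.append(line)
--                 break
--         collected.append(line)
--     if seen == 0:
--         return output
--     collected.reverse()
--     return "\n".join(collected).strip()
-- ===== Notes on version B (the rewrite author's own statement) =====
-- stated objective: alternative
-- what changed: Replaces A's index-based design (two end-scans producing indices, then a slice lines[start:]) with a single backward pass that builds the answer back-to-front into an accumulator, counting prompt lines and stopping after the first (RESTART/QUIT case) or second prompt; no indices or slicing are used.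
import Mathlib
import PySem

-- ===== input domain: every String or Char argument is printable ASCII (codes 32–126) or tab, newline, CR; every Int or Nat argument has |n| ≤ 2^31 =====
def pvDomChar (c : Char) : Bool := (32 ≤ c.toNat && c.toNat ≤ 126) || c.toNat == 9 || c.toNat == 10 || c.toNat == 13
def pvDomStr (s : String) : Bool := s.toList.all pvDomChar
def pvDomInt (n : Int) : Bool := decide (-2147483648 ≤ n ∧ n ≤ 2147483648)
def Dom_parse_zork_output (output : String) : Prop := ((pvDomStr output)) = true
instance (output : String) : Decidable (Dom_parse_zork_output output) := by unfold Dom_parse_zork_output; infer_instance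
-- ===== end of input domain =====

-- B replaces A's index-based scans and slice by a single backward pass that builds the
-- answer back-to-front, stopping after the first or second prompt line (objective: alternative).

-- ===== PORT A =====
-- line.strip().startswith(">")
def pvPrompt (l : List Char) : Bool := PySem.Chars.startswith (PySem.Chars.strip l) ['>']

-- A's first loop: 'for i, line in enumerate(reversed(lines)): if prompt: last = len(lines)-1-i; break'
-- (i and the produced index are nonnegative in Python, so Nat is exact here)
def pvLastLoop (rev : List (List Char)) (i n : Nat) : Option Nat :=
  match rev with
  | [] => none
  | l :: rest => if pvPrompt l then some (n - 1 - i) else pvLastLoop rest (i + 1) n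

-- A's second loop: 'for i in range(last-1, -1, -1): if prompt(lines[i]): second = i; break'
-- (called with j = last-1; all visited indices are in range, so getD's default is never read)
def pvSecondLoop (lines : List (List Char)) : Nat → Option Nat
  | 0 => if pvPrompt (lines.getD 0 []) then some 0 else none
  | j + 1 => if pvPrompt (lines.getD (j + 1) []) then some (j + 1) else pvSecondLoop lines j

def parse_zork_output (output : String) : String :=
  let lines := PySem.Chars.splitlines output.toList
  match pvLastLoop lines.reverse 0 lines.length with
  | none => output
  | some last =>
    -- lines[-1]; lines is nonempty here (a prompt was found), so pyGet? returns a value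
    let lastLine := (PySem.List.pyGet? lines (-1)).getD []
    let start :=
      if PySem.Chars.isIn "RESTART".toList lastLine || PySem.Chars.isIn "QUIT".toList lastLine then
        last
      else
        -- range(last-1, -1, -1) is empty when last = 0
        match (if last = 0 then none else pvSecondLoop lines (last - 1)) with
        | some s => s + 1
        | none => 0
    -- "\n".join(lines[start:]).strip(); start ≥ 0, so the slice is a drop
    String.ofList (PySem.Chars.strip (PySem.Chars.join ['\n'] (lines.drop start)))

-- ===== PORT B =====
-- B's loop over reversed(lines): append each line to `collected`, count prompt lines in
-- `seen`, break at `stop_at` prompts (appending the prompt line only in the restart case)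
def pvLoopB (rev : List (List Char)) (stopAt : Nat) (restart : Bool) (seen : Nat)
    (acc : List (List Char)) : Nat × List (List Char) :=
  match rev with
  | [] => (seen, acc)
  | l :: rest =>
    if pvPrompt l then
      if seen + 1 == stopAt then
        (seen + 1, if restart then acc ++ [l] else acc)
      else pvLoopB rest stopAt restart (seen + 1) (acc ++ [l])
    else pvLoopB rest stopAt restart seen (acc ++ [l])

def parse_zork_output_alt (output : String) : String :=
  let lines := PySem.Chars.splitlines output.toList
  -- restart = bool(lines) and ("RESTART" in lines[-1] or "QUIT" in lines[-1])
  let restart :=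
    !lines.isEmpty &&
      (PySem.Chars.isIn "RESTART".toList (lines.getLast?.getD []) ||
       PySem.Chars.isIn "QUIT".toList (lines.getLast?.getD []))
  let stopAt := if restart then 1 else 2
  let r := pvLoopB lines.reverse stopAt restart 0 []
  if r.1 == 0 then output
  else String.ofList (PySem.Chars.strip (PySem.Chars.join ['\n'] r.2.reverse))

-- ===== PRECONDITION & SPEC =====
def Spec_parse_zork_output (output : String) (out : String) : Prop := out = parse_zork_output_alt output
instance (output : String) (out : String) : Decidable (Spec_parse_zork_output output out) := by unfold Spec_parse_zork_output; infer_instance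

-- ===== CLAIM (what is proved, stated in full; the proofs are below) =====
def Claim_equal_parse_zork_output : Prop := ∀ (output : String), Dom_parse_zork_output output → Spec_parse_zork_output output (parse_zork_output output)

-- ===== LEMMAS AND PROOFS =====

-- the canonical list of prompt indices, in increasing order
def pvR (L : List (List Char)) (n : Nat) : List Nat :=
  (List.range n).filter (fun i => pvPrompt (L.getD i []))

theorem pvR_succ (L : List (List Char)) (n : Nat) :
    pvR L (n + 1) = pvR L n ++ (if pvPrompt (L.getD n []) then [n] else []) := by
  unfold pvR
  rw [List.range_succ, List.filter_append]
  congr 1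
  simp [List.filter_singleton]

theorem pvLastLoop_eq (rev : List (List Char)) (i n : Nat) :
    pvLastLoop rev i n = (rev.findIdx? pvPrompt).map (fun k => n - 1 - (i + k)) := by
  induction rev generalizing i with
  | nil => rfl
  | cons l rest ih =>
    simp only [pvLastLoop, List.findIdx?_cons]
    by_cases h : pvPrompt l
    · simp [h]
    · simp only [h, Bool.false_eq_true, ite_false, ih (i + 1), Option.map_map]
      apply congrArg (fun f => Option.map f _)
      funext k
      simp [Function.comp]
      omega

theorem pvR_append (M : List (List Char)) (x : List Char) (n : Nat) (h : n ≤ M.length) :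
    pvR (M ++ [x]) n = pvR M n := by
  unfold pvR
  apply List.filter_congr
  intro i hi
  rw [List.mem_range] at hi
  rw [List.getD_append _ _ _ i (by omega)]

theorem pvRevFind (L : List (List Char)) :
    (L.reverse.findIdx? pvPrompt).map (fun k => L.length - 1 - k) = (pvR L L.length).getLast? := by
  induction L using List.reverseRecOn with
  | nil => rfl
  | append_singleton M x ih =>
    rw [List.reverse_append, List.reverse_singleton, List.singleton_append, List.findIdx?_cons]
    have hx : (M ++ [x]).getD M.length [] = x := by
      rw [List.getD_eq_getElem?_getD, List.getElem?_concat_length]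
      rfl
    by_cases h : pvPrompt x
    · rw [if_pos h]
      rw [List.length_append, List.length_singleton, pvR_succ, hx, if_pos h,
        List.getLast?_concat]
      simp
    · rw [if_neg h]
      rw [List.length_append, List.length_singleton, pvR_succ, hx, if_neg h,
        List.append_nil, pvR_append M x M.length le_rfl, ← ih, Option.map_map]
      apply congrArg (fun f => Option.map f _)
      funext k
      simp [Function.comp]
      omega

theorem pvSecondLoop_eq (L : List (List Char)) (j : Nat) :
    pvSecondLoop L j = (pvR L (j + 1)).getLast? := by
  induction j with
  | zero =>
    rw [pvSecondLoop, pvR_succ]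
    by_cases h : pvPrompt (L.getD 0 []) = true
    · rw [if_pos h, if_pos h]
      simp [pvR]
    · rw [if_neg h, if_neg h]
      simp [pvR]
  | succ j ih =>
    rw [pvSecondLoop, pvR_succ]
    by_cases h : pvPrompt (L.getD (j + 1) [])
    · rw [if_pos h, if_pos h, List.getLast?_concat]
    · rw [if_neg h, if_neg h, List.append_nil, ih]

theorem pvGetNeg1 {α : Type} (l : List α) : PySem.List.pyGet? l (-1) = l.getLast? := by
  simp [PySem.List.pyGet?, PySem.List.pyIdx?]
  cases l with
  | nil => rfl
  | cons x xs =>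
    rw [List.getLast?_eq_getElem?]
    simp

-- the last element of pvR L n is the last prompt index: in range, a prompt, nothing after
theorem pvR_last_char (L : List (List Char)) (n t : Nat)
    (h : (pvR L n).getLast? = some t) :
    t < n ∧ pvPrompt (L.getD t []) = true ∧
      ∀ i, t < i → i < n → pvPrompt (L.getD i []) = false := by
  induction n with
  | zero => simp [pvR] at h
  | succ n ih =>
    rw [pvR_succ] at h
    by_cases hp : pvPrompt (L.getD n [])
    · rw [if_pos hp, List.getLast?_concat] at h
      obtain rfl : n = t := Option.some.inj h
      exact ⟨Nat.lt_succ_self _, hp, fun i h1 h2 => by omega⟩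
    · rw [if_neg hp, List.append_nil] at h
      obtain ⟨h1, h2, h3⟩ := ih h
      refine ⟨by omega, h2, fun i hi1 hi2 => ?_⟩
      rcases Nat.lt_succ_iff_lt_or_eq.mp hi2 with hlt | rfl
      · exact h3 i hi1 hlt
      · exact Bool.eq_false_iff.mpr hp

-- running the B loop over a prompt-free prefix just moves it into the accumulator
theorem pvLoopB_free (u rest : List (List Char)) (s : Nat) (r : Bool) (seen : Nat)
    (acc : List (List Char)) (hu : ∀ l ∈ u, pvPrompt l = false) :
    pvLoopB (u ++ rest) s r seen acc = pvLoopB rest s r seen (acc ++ u) := by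
  induction u generalizing acc with
  | nil => simp
  | cons x xs ih =>
    have hx : pvPrompt x = false := hu x (List.mem_cons_self ..)
    rw [List.cons_append, pvLoopB]
    simp only [hx, Bool.false_eq_true, ite_false]
    rw [ih (acc ++ [x]) (fun l hl => hu l (List.mem_cons_of_mem _ hl)), List.append_assoc]
    rfl

-- decomposition of L at a last-prompt-style index t
theorem pvSplit (L : List (List Char)) (t : Nat) (ht : t < L.length) :
    L = L.take t ++ L.getD t [] :: L.drop (t + 1) := by
  conv_lhs => rw [← List.take_append_drop t L]
  congr 1
  rw [List.getD_eq_getElem?_getD, List.getElem?_eq_getElem ht, Option.getD_some]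
  exact List.drop_eq_getElem_cons ht

-- elements of L.drop (t+1) are the L.getD i for t < i < L.length
theorem pvDropFree (L : List (List Char)) (t : Nat)
    (h : ∀ i, t < i → i < L.length → pvPrompt (L.getD i []) = false) :
    ∀ l ∈ L.drop (t + 1), pvPrompt l = false := by
  intro l hl
  obtain ⟨j, hj, rfl⟩ := List.mem_iff_getElem.mp hl
  rw [List.getElem_drop]
  have hlen : t + 1 + j < L.length := by
    have := hj
    rw [List.length_drop] at this
    omega
  have := h (t + 1 + j) (by omega) hlen
  rwa [List.getD_eq_getElem?_getD, List.getElem?_eq_getElem hlen, Option.getD_some] at this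

-- one step of the B loop at a prompt line that reaches stop_at, restart = true
theorem pvLoopB_hitT (l : List Char) (rest : List (List Char)) (stopAt seen : Nat)
    (acc : List (List Char)) (hp : pvPrompt l = true) (hs : (seen + 1 == stopAt) = true) :
    pvLoopB (l :: rest) stopAt true seen acc = (seen + 1, acc ++ [l]) := by
  simp [pvLoopB, hp, hs]

-- one step of the B loop at a prompt line that reaches stop_at, restart = false
theorem pvLoopB_hitF (l : List Char) (rest : List (List Char)) (stopAt seen : Nat)
    (acc : List (List Char)) (hp : pvPrompt l = true) (hs : (seen + 1 == stopAt) = true) :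
    pvLoopB (l :: rest) stopAt false seen acc = (seen + 1, acc) := by
  simp [pvLoopB, hp, hs]

-- one step of the B loop at a prompt line below stop_at
theorem pvLoopB_miss (l : List Char) (rest : List (List Char)) (stopAt : Nat) (r : Bool)
    (seen : Nat) (acc : List (List Char)) (hp : pvPrompt l = true)
    (hs : (seen + 1 == stopAt) = false) :
    pvLoopB (l :: rest) stopAt r seen acc = pvLoopB rest stopAt r (seen + 1) (acc ++ [l]) := by
  simp [pvLoopB, hp, hs]

-- ===== VERDICT (by name: the statement is the Claim_ definition above) =====
theorem parse_zork_output_spec : Claim_equal_parse_zork_output := by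
  intro output _
  unfold Spec_parse_zork_output parse_zork_output parse_zork_output_alt
  simp only []
  set L := PySem.Chars.splitlines output.toList with hL
  have hlast : pvLastLoop L.reverse 0 L.length = (pvR L L.length).getLast? := by
    rw [pvLastLoop_eq, ← pvRevFind L]
    simp
  rw [hlast, pvGetNeg1]
  cases h : (pvR L L.length).getLast? with
  | none =>
    -- no prompt anywhere: the B loop never increments seen
    have hnil : pvR L L.length = [] := List.getLast?_eq_none_iff.mp h
    have hrevfree : ∀ l ∈ L.reverse, pvPrompt l = false := by
      intro l hl
      obtain ⟨j, hj, rfl⟩ := List.mem_iff_getElem.mp (List.mem_reverse.mp hl)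
      by_contra hc
      have hmem : j ∈ pvR L L.length := by
        unfold pvR
        rw [List.mem_filter, List.mem_range]
        refine ⟨hj, ?_⟩
        rw [List.getD_eq_getElem?_getD, List.getElem?_eq_getElem hj, Option.getD_some]
        exact Bool.not_eq_false _ |>.mp hc
      rw [hnil] at hmem
      exact absurd hmem (List.not_mem_nil)
    have hloop : ∀ s r, pvLoopB L.reverse s r 0 [] = (0, L.reverse) := by
      intro s r
      have := pvLoopB_free L.reverse [] s r 0 [] hrevfree
      simpa using this
    rw [hloop]
    simp
  | some t =>
    obtain ⟨ht, hpt, hafter⟩ := pvR_last_char L L.length t h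
    have hLne : L ≠ [] := by
      intro hnil
      rw [hnil] at ht
      simp at ht
    have hrev : L.reverse = (L.drop (t + 1)).reverse ++ L.getD t [] :: (L.take t).reverse := by
      conv_lhs => rw [pvSplit L t ht]
      simp
    have hufree : ∀ l ∈ (L.drop (t + 1)).reverse, pvPrompt l = false := by
      intro l hl
      exact pvDropFree L t hafter l (List.mem_reverse.mp hl)
    have hIsEmpty : L.isEmpty = false := by
      rw [List.isEmpty_eq_false_iff]
      exact hLne
    have hTail : L[t]?.getD ([] : List Char) :: L.drop (t + 1) = L.drop t := by
      rw [List.getElem?_eq_getElem ht, Option.getD_some]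
      exact (List.drop_eq_getElem_cons ht).symm
    by_cases hcv : (PySem.Chars.isIn "RESTART".toList (L.getLast?.getD []) ||
        PySem.Chars.isIn "QUIT".toList (L.getLast?.getD [])) = true
    · -- restart branch: stopAt = 1, the loop stops at the first prompt (inclusive)
      simp only [hcv, hIsEmpty, Bool.not_false, Bool.true_and, if_true]
      rw [hrev, pvLoopB_free _ _ 1 true 0 [] hufree, List.nil_append,
        pvLoopB_hitT _ _ _ _ _ hpt rfl]
      simp [hTail]
    · -- normal branch: stopAt = 2
      have hcv' : (PySem.Chars.isIn "RESTART".toList (L.getLast?.getD []) ||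
          PySem.Chars.isIn "QUIT".toList (L.getLast?.getD [])) = false :=
        Bool.eq_false_iff.mpr hcv
      simp only [hcv', hIsEmpty, Bool.not_false, Bool.true_and, Bool.false_eq_true,
        ite_false]
      rw [hrev, pvLoopB_free _ _ 2 false 0 [] hufree, List.nil_append,
        pvLoopB_miss _ _ _ _ _ _ hpt rfl]
      -- now the loop runs over (L.take t).reverse with seen = 1
      cases hsec : (pvR L t).getLast? with
      | none =>
        -- no earlier prompt: A starts at 0; B's loop exhausts the list with seen = 1
        have hnil2 : pvR L t = [] := List.getLast?_eq_none_iff.mp hsec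
        have htake_free : ∀ l ∈ (L.take t).reverse, pvPrompt l = false := by
          intro l hl
          obtain ⟨j, hj, rfl⟩ := List.mem_iff_getElem.mp (List.mem_reverse.mp hl)
          have hjt : j < t := by
            have := hj
            rw [List.length_take] at this
            omega
          have hjL : j < L.length := by omega
          rw [List.getElem_take]
          by_contra hcb
          have hmem : j ∈ pvR L t := by
            unfold pvR
            rw [List.mem_filter, List.mem_range]
            refine ⟨hjt, ?_⟩
            rw [List.getD_eq_getElem?_getD, List.getElem?_eq_getElem hjL, Option.getD_some]
            exact Bool.not_eq_false _ |>.mp hcb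
          rw [hnil2] at hmem
          exact absurd hmem (List.not_mem_nil)
        have hrun := pvLoopB_free ((L.take t).reverse) [] 2 false (0 + 1)
          ((L.drop (t + 1)).reverse ++ [L.getD t []]) htake_free
        rw [List.append_nil] at hrun
        rw [hrun, pvLoopB]
        have hAstart : (if t = 0 then none else pvSecondLoop L (t - 1)) = none := by
          by_cases ht0 : t = 0
          · rw [if_pos ht0]
          · rw [if_neg ht0, pvSecondLoop_eq]
            have ht1 : t - 1 + 1 = t := by omega
            rw [ht1, hsec]
        rw [hAstart]
        simp [hTail, List.take_append_drop]
      | some s2 =>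
        obtain ⟨hs2t, hps2, hafter2⟩ := pvR_last_char L t s2 hsec
        have hs2L : s2 < L.length := by omega
        have hAstart : (if t = 0 then none else pvSecondLoop L (t - 1)) = some s2 := by
          have ht0 : t ≠ 0 := by omega
          rw [if_neg ht0, pvSecondLoop_eq]
          have ht1 : t - 1 + 1 = t := by omega
          rw [ht1, hsec]
        rw [hAstart]
        have htt : (L.take t).length = t := by
          rw [List.length_take]
          omega
        have hs2t' : s2 < (L.take t).length := by omega
        have hgetD : (L.take t).getD s2 [] = L.getD s2 [] := by
          rw [List.getD_eq_getElem?_getD, List.getD_eq_getElem?_getD,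
            List.getElem?_take_of_lt hs2t]
        have hrev2 : (L.take t).reverse
            = ((L.take t).drop (s2 + 1)).reverse ++
              (L.take t).getD s2 [] :: ((L.take t).take s2).reverse := by
          conv_lhs => rw [pvSplit (L.take t) s2 hs2t']
          simp
        have hu2free : ∀ l ∈ ((L.take t).drop (s2 + 1)).reverse, pvPrompt l = false := by
          intro l hl
          refine pvDropFree (L.take t) s2 ?_ l (List.mem_reverse.mp hl)
          intro i hi1 hi2
          rw [htt] at hi2
          have hgi : (L.take t).getD i [] = L.getD i [] := by
            rw [List.getD_eq_getElem?_getD, List.getD_eq_getElem?_getD,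
              List.getElem?_take_of_lt hi2]
          rw [hgi]
          exact hafter2 i hi1 hi2
        rw [hrev2, pvLoopB_free _ _ 2 false (0 + 1) _ hu2free, hgetD,
          pvLoopB_hitF _ _ _ _ _ hps2 rfl]
        have hcoll2 : (L.take t).drop (s2 + 1) ++ L.drop t = L.drop (s2 + 1) := by
          rw [List.drop_take]
          conv_rhs => rw [← List.take_append_drop (t - (s2 + 1)) (L.drop (s2 + 1))]
          congr 1
          rw [List.drop_drop]
          congr 1
          omega
        simp [hTail, hcoll2]
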